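-- pv_equiv track=rewrite | github.com/Houssame-EA/IsotopeTrack | widget/interference_database.py | get_worst_severity
-- ===== SOURCE A (Python) =====
-- def get_worst_severity(interferences: list) -> str:
--     """
--     Get the worst (most severe) interference severity from a list.
--
--     Args:
--         interferences: List of interference dicts
--
--     Returns:
--         'critical', 'major', 'minor', or 'none'
--     """
--     severity_order = {'critical': 3, 'major': 2, 'minor': 1}
--     worst = 0
--     for interf in interferences:
--         sev = severity_order.get(interf.get('severity', 'minor'), 0)
--         if sev > worst:
--             worst = sev
--
--     reverse_map = {3: 'critical', 2: 'major', 1: 'minor', 0: 'none'}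
--     return reverse_map[worst]
-- ===== SOURCE B (Python) =====
-- def get_worst_severity(interferences: list) -> str:
--     """Prioritized scan: check each severity tier from worst to least; first tier present wins."""
--     for level in ('critical', 'major', 'minor'):
--         if any(i.get('severity', 'minor') == level for i in interferences):
--             return level
--     return 'none'
-- ===== Notes on version B (the rewrite author's own statement) =====
-- stated objective: simpler
-- what changed: Replaced the numeric score running-max pass plus reverse lookup table by a direct prioritized scan: for each tier critical/major/minor in order, return it if any entry has that (defaulted) severity, else 'none'.
import Mathlib
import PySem

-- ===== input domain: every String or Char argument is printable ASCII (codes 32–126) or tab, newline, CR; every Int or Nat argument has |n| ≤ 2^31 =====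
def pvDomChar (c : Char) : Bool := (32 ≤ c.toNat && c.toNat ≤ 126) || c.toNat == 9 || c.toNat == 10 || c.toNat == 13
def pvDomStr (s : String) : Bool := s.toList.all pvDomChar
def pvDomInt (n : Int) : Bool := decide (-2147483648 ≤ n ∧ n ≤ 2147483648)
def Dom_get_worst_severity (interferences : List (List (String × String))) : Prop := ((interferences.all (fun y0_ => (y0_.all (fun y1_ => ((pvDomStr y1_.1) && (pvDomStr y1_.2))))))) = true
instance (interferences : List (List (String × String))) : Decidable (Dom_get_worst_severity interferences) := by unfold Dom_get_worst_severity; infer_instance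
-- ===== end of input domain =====

-- B replaces A's numeric running-max + reverse lookup table by a prioritized per-tier scan ('simpler'); return values proved equal on all inputs.

-- ===== PORT A =====
-- severity_order = {'critical': 3, 'major': 2, 'minor': 1}
def pvSeverityOrder : PySem.Dict String Int := PySem.Dict.mk [("critical", 3), ("major", 2), ("minor", 1)]
-- reverse_map = {3: 'critical', 2: 'major', 1: 'minor', 0: 'none'}
def pvReverseMap : PySem.Dict Int String := PySem.Dict.mk [(3, "critical"), (2, "major"), (1, "minor"), (0, "none")]

def get_worst_severity (interferences : List (List (String × String))) : String :=
  let worst : Int := interferences.foldl (fun worst interf =>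
    let sev := pvSeverityOrder.getD ((PySem.Dict.mk interf).getD "severity" "minor") 0
    if sev > worst then sev else worst) 0
  -- reverse_map[worst]: worst is always one of 0,1,2,3, so the key is always present; '.getD ""' is never the default branch
  (pvReverseMap.get? worst).getD ""

-- ===== PORT B =====
-- i.get('severity', 'minor')
def pvSevB (i : List (String × String)) : String := (PySem.Dict.mk i).getD "severity" "minor"

def get_worst_severity_alt (interferences : List (List (String × String))) : String :=
  if interferences.any (fun i => pvSevB i == "critical") then "critical"
  else if interferences.any (fun i => pvSevB i == "major") then "major"
  else if interferences.any (fun i => pvSevB i == "minor") then "minor"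
  else "none"

-- ===== PRECONDITION & SPEC =====
def Spec_get_worst_severity (interferences : List (List (String × String))) (out : String) : Prop := out = get_worst_severity_alt interferences
instance (interferences : List (List (String × String))) (out : String) : Decidable (Spec_get_worst_severity interferences out) := by unfold Spec_get_worst_severity; infer_instance

-- ===== CLAIM (what is proved, stated in full; the proofs are below) =====
def Claim_equal_get_worst_severity : Prop := ∀ (interferences : List (List (String × String))), Dom_get_worst_severity interferences → Spec_get_worst_severity interferences (get_worst_severity interferences)

-- ===== LEMMAS AND PROOFS =====

-- the numeric score A assigns to one entry
def pvScore (i : List (String × String)) : Int := pvSeverityOrder.getD (pvSevB i) 0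

lemma pvScore_cases (i : List (String × String)) :
    pvScore i = if pvSevB i == "critical" then 3 else if pvSevB i == "major" then 2
      else if pvSevB i == "minor" then 1 else 0 := by
  unfold pvScore
  by_cases h1 : pvSevB i = "critical" <;> by_cases h2 : pvSevB i = "major" <;>
    by_cases h3 : pvSevB i = "minor" <;>
    first
      | (rw [h1]; decide)
      | (rw [h2]; decide)
      | (rw [h3]; decide)
      | simp [pvSeverityOrder, PySem.Dict.getD_eq_get?_getD,
          beq_iff_eq, h1, h2, h3, Ne.symm h1, Ne.symm h2, Ne.symm h3, PySem.Dict.get?]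

lemma pvScore_nonneg (i : List (String × String)) : 0 ≤ pvScore i := by
  rw [pvScore_cases]; split_ifs <;> norm_num

-- A's fold step is a max with the score
lemma pvStep_eq_max (w : Int) (i : List (String × String)) :
    (if pvSeverityOrder.getD ((PySem.Dict.mk i).getD "severity" "minor") 0 > w
      then pvSeverityOrder.getD ((PySem.Dict.mk i).getD "severity" "minor") 0 else w)
    = max w (pvScore i) := by
  unfold pvScore pvSevB
  split_ifs with h <;> omega

def pvM (xs : List (List (String × String))) : Int :=
  xs.foldl (fun w i => max w (pvScore i)) 0

lemma pvFold_acc (xs : List (List (String × String))) (w : Int) (hw : 0 ≤ w) :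
    xs.foldl (fun w i => max w (pvScore i)) w = max w (pvM xs) := by
  induction xs generalizing w with
  | nil => simp only [List.foldl_nil, pvM]; omega
  | cons x xs ih =>
    have hx := pvScore_nonneg x
    simp only [pvM, List.foldl_cons] at *
    rw [ih (max w (pvScore x)) (by omega), ih (max 0 (pvScore x)) (by omega)]
    omega

lemma pvA_fold_eq (xs : List (List (String × String))) (w : Int) :
    xs.foldl (fun worst interf =>
      let sev := pvSeverityOrder.getD ((PySem.Dict.mk interf).getD "severity" "minor") 0
      if sev > worst then sev else worst) w
    = xs.foldl (fun w i => max w (pvScore i)) w := by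
  induction xs generalizing w with
  | nil => rfl
  | cons x xs _ => simp only [List.foldl_cons, pvStep_eq_max]

-- the max of the scores, expressed through B's three tier scans
lemma pvM_chain (xs : List (List (String × String))) :
    pvM xs = (if xs.any (fun i => pvSevB i == "critical") then 3
      else if xs.any (fun i => pvSevB i == "major") then 2
      else if xs.any (fun i => pvSevB i == "minor") then 1 else 0) := by
  induction xs with
  | nil => simp [pvM]
  | cons x xs ih =>
    have hx : pvM (x :: xs) = max (pvScore x) (pvM xs) := by
      have h0 := pvScore_nonneg x
      have hacc := pvFold_acc xs (max 0 (pvScore x)) (le_max_left 0 _)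
      simp only [pvM, List.foldl_cons] at *
      omega
    rw [hx, ih, pvScore_cases x]
    simp only [List.any_cons]
    by_cases h1 : pvSevB x = "critical" <;> by_cases h2 : pvSevB x = "major" <;>
      by_cases h3 : pvSevB x = "minor" <;>
      by_cases a1 : xs.any (fun i => pvSevB i == "critical") <;>
      by_cases a2 : xs.any (fun i => pvSevB i == "major") <;>
      by_cases a3 : xs.any (fun i => pvSevB i == "minor") <;>
      simp [h1, h2, h3, a1, a2, a3]

-- ===== VERDICT (by name: the statement is the Claim_ definition above) =====
theorem get_worst_severity_spec : Claim_equal_get_worst_severity := by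
  intro xs _
  unfold Spec_get_worst_severity get_worst_severity get_worst_severity_alt
  rw [pvA_fold_eq]
  have h := pvFold_acc xs 0 le_rfl
  have hM := pvM_chain xs
  rw [h]
  by_cases a1 : xs.any (fun i => pvSevB i == "critical") <;>
    by_cases a2 : xs.any (fun i => pvSevB i == "major") <;>
    by_cases a3 : xs.any (fun i => pvSevB i == "minor") <;>
    simp only [a1, a2, a3, if_true] at hM ⊢ <;>
    rw [show max 0 (pvM xs) = pvM xs from by have := hM; omega, hM] <;>
    simp [pvReverseMap, PySem.Dict.get?_mk_cons]
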